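-- pv_equiv track=rewrite | github.com/Alvaropz/Python_problems_BinarySearch | 1. Easy/word_formation/word_formation.py | word_formation
-- ===== SOURCE A (Python) =====
-- from collections import Counter
--
-- def word_formation(words, letters):
--     max_size = 0
--     for word in words:
--         temp_count = 0
--         temp_dict = Counter(letters)
--         for char in word:
--             if char in temp_dict:
--                 if temp_dict[char] > 0:
--                     temp_count += 1
--                     temp_dict[char] -= 1
--                 else:
--                     break
--             else:
--                 break
--         if temp_count == len(word) and temp_count > max_size:
--             max_size = temp_count
--     return max_size
-- ===== SOURCE B (Python) =====
-- from collections import Counter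
--
-- def word_formation(words, letters):
--     available = Counter(letters)
--     return max((len(word) for word in words if not (Counter(word) - available)),
--                default=0)
-- ===== Notes on version B (the rewrite author's own statement) =====
-- stated objective: faster
-- what changed: Replaces A's per-word consume-and-break scan over a freshly rebuilt mutable Counter(letters) copy by one precomputed availability Counter and a whole-Counter comparison (Counter(word) - available is empty) feeding max(..., default=0).
import Mathlib
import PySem

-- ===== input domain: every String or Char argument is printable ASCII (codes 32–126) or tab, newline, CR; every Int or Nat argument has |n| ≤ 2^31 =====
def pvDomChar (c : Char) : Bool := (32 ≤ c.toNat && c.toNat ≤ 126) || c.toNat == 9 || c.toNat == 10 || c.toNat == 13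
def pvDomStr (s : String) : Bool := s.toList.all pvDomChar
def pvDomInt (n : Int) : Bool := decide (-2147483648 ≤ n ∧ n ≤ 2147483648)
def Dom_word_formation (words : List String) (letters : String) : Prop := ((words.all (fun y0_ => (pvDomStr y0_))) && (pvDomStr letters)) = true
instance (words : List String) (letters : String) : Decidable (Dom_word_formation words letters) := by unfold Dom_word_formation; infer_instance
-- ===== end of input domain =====

-- B replaces A's per-word consume-and-break scan over a mutable copied Counter by one
-- precomputed availability Counter compared whole against Counter(word) (idiomatic; return value only).

-- ===== PORT A =====
-- inner 'for char in word' loop of A, with its early break (returns temp_count)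
def wfInner : List Char → PySem.Dict Char Int → Int → Int
  | [], _, temp_count => temp_count
  | c :: rest, temp_dict, temp_count =>
    if temp_dict.contains c then
      if temp_dict.getD c 0 > 0 then
        wfInner rest (temp_dict.insert c (temp_dict.getD c 0 - 1)) (temp_count + 1)
      else temp_count
    else temp_count

def word_formation (words : List String) (letters : String) : Int :=
  words.foldl (fun max_size word =>
    let temp_count := wfInner word.toList (PySem.Dict.counter letters.toList) 0
    if temp_count = PySem.Str.len word ∧ temp_count > max_size then temp_count
    else max_size) 0

-- ===== PORT B =====
-- 'not (Counter(word) - available)': Counter subtraction is empty iff no letter is in deficit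
def wfFormable (w : List Char) (available : PySem.Dict Char Int) : Bool :=
  (PySem.Dict.counter w).items.all (fun p => decide (p.2 ≤ available.getD p.1 0))

def word_formation_alt (words : List String) (letters : String) : Int :=
  let available := PySem.Dict.counter letters.toList
  PySem.List.maxD
    ((words.filter (fun word => wfFormable word.toList available)).map
      (fun word => PySem.Str.len word))
    (fun x => x) 0

-- ===== PRECONDITION & SPEC =====
def Spec_word_formation (words : List String) (letters : String) (out : Int) : Prop := out = word_formation_alt words letters
instance (words : List String) (letters : String) (out : Int) : Decidable (Spec_word_formation words letters out) := by unfold Spec_word_formation; infer_instance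

-- ===== CLAIM (what is proved, stated in full; the proofs are below) =====
def Claim_equal_word_formation : Prop := ∀ (words : List String) (letters : String), Dom_word_formation words letters → Spec_word_formation words letters (word_formation words letters)

-- ===== LEMMAS AND PROOFS =====

-- w is formable from the multiset described by d
def wfForm (w : List Char) (d : PySem.Dict Char Int) : Prop :=
  ∀ c ∈ w, (w.count c : Int) ≤ d.getD c 0

theorem wfInner_full (cs : List Char) (d : PySem.Dict Char Int) (k : Int)
    (h : wfForm cs d) : wfInner cs d k = k + cs.length := by
  induction cs generalizing d k with
  | nil => simp [wfInner]
  | cons c rest ih =>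
    have hc : (((c :: rest).count c : Nat) : Int) ≤ d.getD c 0 :=
      h c (List.mem_cons_self ..)
    have hcount : 0 < (c :: rest).count c := by simp
    have hpos : 0 < d.getD c 0 := by
      have : (1 : Int) ≤ ((c :: rest).count c : Int) := by exact_mod_cast hcount
      omega
    have hcont : d.contains c = true := by
      by_contra hn
      have : d.contains c = false := by simpa using hn
      rw [PySem.Dict.getD_of_not_contains d 0 this] at hpos; omega
    simp only [wfInner, hcont, if_pos hpos, if_true]
    rw [ih]
    · simp only [List.length_cons]; push_cast; omega
    · intro c' hc'
      by_cases he : c' = c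
      · subst he
        rw [PySem.Dict.getD_insert_self]
        have : (c' :: rest).count c' = rest.count c' + 1 := by
          simp [List.count_cons_self]
        rw [this] at hc; push_cast at hc ⊢; omega
      · rw [PySem.Dict.getD_insert_of_ne d _ _ he]
        have := h c' (List.mem_cons_of_mem _ hc')
        have hcnt : (c :: rest).count c' = rest.count c' := by
          simp [Ne.symm he]
        rw [hcnt] at this; exact this

theorem wfInner_notfull (cs : List Char) (d : PySem.Dict Char Int) (k : Int)
    (h : ¬ wfForm cs d) : wfInner cs d k < k + cs.length := by
  induction cs generalizing d k with
  | nil => exact absurd (by intro c hc; simp at hc) h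
  | cons c rest ih =>
    simp only [wfInner]
    split_ifs with h1 h2
    · have hrest : ¬ wfForm rest (d.insert c (d.getD c 0 - 1)) := by
        intro hrf
        apply h
        intro c' hc'
        by_cases he : c' = c
        · subst he
          have := hrf c'
          have hcnt : (c' :: rest).count c' = rest.count c' + 1 := by
            simp [List.count_cons_self]
          rw [hcnt]
          by_cases hm : c' ∈ rest
          · have := hrf c' hm
            rw [PySem.Dict.getD_insert_self] at this
            push_cast at this ⊢; omega
          · have : rest.count c' = 0 := List.count_eq_zero.mpr hm
            rw [this]; push_cast; omega
        · rcases List.mem_cons.mp hc' with he' | hm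
          · exact absurd he' he
          · have := hrf c' hm
            rw [PySem.Dict.getD_insert_of_ne d _ _ he] at this
            have hcnt : (c :: rest).count c' = rest.count c' := by
              simp [Ne.symm he]
            rw [hcnt]; exact this
      have := ih (d.insert c (d.getD c 0 - 1)) (k + 1) hrest
      simp only [List.length_cons]; push_cast; omega
    · simp only [List.length_cons]; push_cast
      have : (0:Int) ≤ rest.length := by positivity
      omega
    · simp only [List.length_cons]; push_cast
      have : (0:Int) ≤ rest.length := by positivity
      omega

-- B's Bool check decides exactly wfForm
theorem wfFormable_iff (w : List Char) (d : PySem.Dict Char Int) :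
    wfFormable w d = true ↔ wfForm w d := by
  unfold wfFormable wfForm
  rw [PySem.Dict.items_counter]
  simp only [List.all_map, List.all_eq_true, Function.comp]
  constructor
  · intro h c hc
    have := h c ((PySem.Set.mem_ofList _ _).mpr hc)
    simpa using this
  · intro h c hc
    have := h c ((PySem.Set.mem_ofList _ _).mp hc)
    simpa using this

-- maxD with default 0 over nonnegative ints is the running max from 0
theorem maxD_nonneg (ys : List Int) (h : ∀ y ∈ ys, 0 ≤ y) :
    PySem.List.maxD ys (fun x => x) 0 = ys.foldl max 0 := by
  cases ys with
  | nil => rfl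
  | cons x t =>
    unfold PySem.List.maxD
    rw [PySem.List.max?_id_cons]
    have hx : 0 ≤ x := h x (List.mem_cons_self ..)
    simp only [Option.getD_some, List.foldl_cons]
    have : max 0 x = x := by omega
    rw [this]

-- ===== VERDICT (by name: the statement is the Claim_ definition above) =====
theorem word_formation_spec : Claim_equal_word_formation := by
  intro words letters _
  unfold Spec_word_formation word_formation word_formation_alt
  set avail := PySem.Dict.counter letters.toList with havail
  rw [PySem.List.foldl_congr_mem words _
    (fun max_size word =>
      if wfFormable word.toList avail then max max_size (PySem.Str.len word)
      else max_size) 0 ?_]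
  · rw [PySem.List.foldl_if_eq_foldl_filter (fun word => wfFormable word.toList avail)
      (fun acc word => max acc (PySem.Str.len word))]
    rw [maxD_nonneg _ (by
      intro y hy
      simp only [List.mem_map] at hy
      obtain ⟨w, _, rfl⟩ := hy
      rw [PySem.Str.len_eq]; positivity)]
    rw [List.foldl_map]
  · intro acc w _
    simp only
    by_cases hf : wfFormable w.toList avail = true
    · have hform := (wfFormable_iff _ _).mp hf
      have := wfInner_full w.toList avail 0 hform
      rw [hf]
      simp only [if_true]
      rw [this, PySem.Str.len_eq, zero_add]
      rcases lt_or_ge acc ((w.toList.length : Int)) with h1 | h1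
      · rw [if_pos ⟨rfl, h1⟩]
        exact (max_eq_right h1.le).symm
      · rw [if_neg (by rintro ⟨-, hgt⟩; omega)]
        exact (max_eq_left h1).symm
    · have hform : ¬ wfForm w.toList avail := fun hh => hf ((wfFormable_iff _ _).mpr hh)
      have hlt := wfInner_notfull w.toList avail 0 hform
      rw [if_neg hf, if_neg]
      rintro ⟨h1, -⟩
      rw [PySem.Str.len_eq] at h1
      omega
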